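-- pv_equiv track=rewrite | github.com/zdrj-me31/Repository | coded_correspondence_code.py | cap_sentences
-- ===== SOURCE A (Python) =====
-- def cap_sentences(string):
--     words = string.split()
--     # Loop over the words and capitalize the first letter of each word that follows a delimiter
--     delimiters_lst = ["!", ".", "?"]
--     new_words = []
--     for i in range(len(words)):
--         # Capitalize the first word
--         if i == 0:
--             new_words.append(words[i].capitalize())
--         # Capitalize the first letter of each word that follows a delimiter
--         else:
--             for delim in delimiters_lst:
--                 if words[i - 1].endswith(delim):
--                     new_words.append(words[i].capitalize())
--                     break
--             else:
--                 new_words.append(words[i])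
--     # Join the words back into a single string
--     new_string = " ".join(new_words)
--     return new_string
-- ===== SOURCE B (Python) =====
-- def cap_sentences(string):
--     # Stage 1: segment the words into sentences (each group ends at a word
--     # ending in ! . or ?, plus one trailing unterminated group).
--     sentences = []
--     cur = []
--     for w in string.split():
--         cur.append(w)
--         if w.endswith(("!", ".", "?")):
--             sentences.append(cur)
--             cur = []
--     if cur:
--         sentences.append(cur)
--     # Stage 2: capitalize each sentence's first word, flatten, join.
--     new_words = [w for s in sentences for w in [s[0].capitalize()] + s[1:]]
--     return " ".join(new_words)
-- ===== Notes on version B (the rewrite author's own statement) =====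
-- stated objective: alternative
-- what changed: B works in two stages: it first segments the word list into sentence groups (a group ends at a word ending in !/./?), then capitalizes each group's first word and flattens, instead of A's single pass that probes words[i-1] against each delimiter in an inner for/else loop.
import Mathlib
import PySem

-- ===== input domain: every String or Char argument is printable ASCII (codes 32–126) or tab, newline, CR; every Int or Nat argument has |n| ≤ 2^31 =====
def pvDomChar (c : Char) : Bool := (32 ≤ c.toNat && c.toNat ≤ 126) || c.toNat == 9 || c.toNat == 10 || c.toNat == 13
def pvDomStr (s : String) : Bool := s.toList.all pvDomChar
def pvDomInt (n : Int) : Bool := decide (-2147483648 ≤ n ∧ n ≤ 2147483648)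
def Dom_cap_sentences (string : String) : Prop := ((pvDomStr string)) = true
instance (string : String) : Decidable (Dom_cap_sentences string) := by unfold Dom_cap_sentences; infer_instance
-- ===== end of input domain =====

-- B re-implements A's backward-looking index loop in two stages: segment the words
-- into sentence groups, then capitalize each group's head and flatten; same value.

-- shared helper: Python's str.capitalize() (exact on ASCII)
def pvCap (w : String) : String :=
  match w.toList with
  | [] => ""
  | c :: cs => String.ofList (PySem.Chars.upperChar c :: cs.map PySem.Chars.lowerChar)

-- ===== PORT A =====
-- A's inner 'for delim in delimiters_lst: … break / else:' loop
def capAInner (prev cur : String) (delims : List String) (acc : List String) : List String :=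
  match delims with
  | [] => acc ++ [cur]
  | d :: rest =>
    if PySem.Str.endswith prev d then acc ++ [pvCap cur]
    else capAInner prev cur rest acc

def cap_sentences (string : String) : String :=
  let words := PySem.Str.split₀ string
  let delimiters_lst := ["!", ".", "?"]
  let new_words := (PySem.List.pyRange 0 (words.length : Int) 1).foldl
    (fun acc i =>
      if i == 0 then acc ++ [pvCap (PySem.List.pyGetD words i "")]
      else capAInner (PySem.List.pyGetD words (i - 1) "")
                     (PySem.List.pyGetD words i "") delimiters_lst acc) []
  PySem.Str.join " " new_words

-- ===== PORT B =====
-- B's helper: word.endswith(("!", ".", "?"))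
def pvEndsAny (w : String) : Bool :=
  PySem.Str.endswith w "!" || PySem.Str.endswith w "." || PySem.Str.endswith w "?"

-- B's '[s[0].capitalize()] + s[1:]' (hand port, exact: every group B builds is nonempty)
def capHead : List String → List String
  | [] => []
  | h :: t => pvCap h :: t

def cap_sentences_alt (string : String) : String :=
  let st := (PySem.Str.split₀ string).foldl
    (fun (st : List (List String) × List String) w =>
      let cur' := st.2 ++ [w]
      if pvEndsAny w then (st.1 ++ [cur'], ([] : List String)) else (st.1, cur'))
    ([], [])
  let sentences := if st.2 = [] then st.1 else st.1 ++ [st.2]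
  PySem.Str.join " " (sentences.flatMap capHead)

-- ===== PRECONDITION & SPEC =====
def Spec_cap_sentences (string : String) (out : String) : Prop := out = cap_sentences_alt string
instance (string : String) (out : String) : Decidable (Spec_cap_sentences string out) := by unfold Spec_cap_sentences; infer_instance

-- ===== CLAIM (what is proved, stated in full; the proofs are below) =====
def Claim_equal_cap_sentences : Prop := ∀ (string : String), Dom_cap_sentences string → Spec_cap_sentences string (cap_sentences string)

-- ===== LEMMAS AND PROOFS =====

-- common characterization: the list of output words as a function of the word list
def pvSpecList (b : Bool) : List String → List String
  | [] => []
  | w :: ws => (if b then pvCap w else w) :: pvSpecList (pvEndsAny w) ws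

lemma capAInner_eval (prev cur : String) (acc : List String) :
    capAInner prev cur ["!", ".", "?"] acc
      = acc ++ [if pvEndsAny prev then pvCap cur else cur] := by
  simp only [capAInner, pvEndsAny]
  split_ifs with h1 h2 h3 <;> simp_all

lemma foldl_append_map {α β : Type} (l : List α) (g : α → β) (a : List β) :
    l.foldl (fun acc x => acc ++ [g x]) a = a ++ l.map g := by
  induction l generalizing a with
  | nil => simp
  | cons x xs ih => simp [ih]

lemma specList_eq_range_map (ws : List String) (b : Bool) :
    pvSpecList b ws = (List.range ws.length).map (fun k =>
      if k = 0 then (if b then pvCap (ws.getD 0 "") else ws.getD 0 "")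
      else (if pvEndsAny (ws.getD (k - 1) "") then pvCap (ws.getD k "") else ws.getD k "")) := by
  induction ws generalizing b with
  | nil => simp [pvSpecList]
  | cons w ws ih =>
    simp only [pvSpecList, List.length_cons, List.range_succ_eq_map, List.map_cons,
      List.map_map]
    rw [ih (pvEndsAny w)]
    refine List.cons_eq_cons.mpr ⟨by simp, ?_⟩
    apply List.map_congr_left
    intro k _
    rcases k with _ | k <;> simp

-- A's output words are pvSpecList true of the split words
lemma capA_words (string : String) :
    cap_sentences string
      = PySem.Str.join " " (pvSpecList true (PySem.Str.split₀ string)) := by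
  unfold cap_sentences
  set ws := PySem.Str.split₀ string with hws
  simp only []
  congr 1
  have hbody : ∀ (acc : List String) (i : Int),
      (if i == 0 then acc ++ [pvCap (PySem.List.pyGetD ws i "")]
       else capAInner (PySem.List.pyGetD ws (i - 1) "")
                      (PySem.List.pyGetD ws i "") ["!", ".", "?"] acc)
      = acc ++ [if i == 0 then pvCap (PySem.List.pyGetD ws i "")
                else (if pvEndsAny (PySem.List.pyGetD ws (i - 1) "")
                      then pvCap (PySem.List.pyGetD ws i "")
                      else PySem.List.pyGetD ws i "")] := by
    intro acc i
    by_cases h : i == 0 <;> simp [h, capAInner_eval]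
  rw [funext fun acc => funext fun i => hbody acc i, foldl_append_map,
      List.nil_append, specList_eq_range_map ws true,
      PySem.List.pyRange_one 0 (ws.length : Int)]
  simp only [Int.sub_zero, Int.toNat_natCast, List.map_map]
  apply List.map_congr_left
  intro k _
  rcases k with _ | k
  · simp
    congr 1
    simpa using PySem.List.pyGetD_natCast ws 0 ""
  · have h1 : (0 : Int) + ((k + 1 : Nat) : Int) = ((k + 1 : Nat) : Int) := by push_cast; ring
    have h2 : ((k + 1 : Nat) : Int) - 1 = ((k : Nat) : Int) := by push_cast; ring
    have h3 : (((k + 1 : Nat) : Int) == 0) = false := by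
      rw [beq_eq_false_iff_ne]; omega
    simp only [Function.comp_apply, h1, h2, h3, PySem.List.pyGetD_natCast]
    simp

-- B's grouping fold, flattened with capitalized heads, is also pvSpecList:
-- an empty current group means the next word starts a sentence (flag true);
-- a nonempty one's head gets capitalized when the group is emitted.
lemma capB_fold (ws : List String) (S : List (List String)) (cur : List String) :
    (let st := ws.foldl
        (fun (st : List (List String) × List String) w =>
          let cur' := st.2 ++ [w]
          if pvEndsAny w then (st.1 ++ [cur'], ([] : List String)) else (st.1, cur'))
        (S, cur)
     (if st.2 = [] then st.1 else st.1 ++ [st.2]).flatMap capHead)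
    = S.flatMap capHead ++
      (match cur with
       | [] => pvSpecList true ws
       | h :: t => pvCap h :: (t ++ pvSpecList false ws)) := by
  induction ws generalizing S cur with
  | nil =>
    cases cur with
    | nil => simp [pvSpecList]
    | cons h t => simp [capHead, pvSpecList]
  | cons w rest ih =>
    simp only [List.foldl_cons]
    by_cases hw : pvEndsAny w
    · simp only [hw, if_true]
      rw [ih]
      cases cur with
      | nil => simp [capHead, pvSpecList, hw]
      | cons h t => simp [capHead, pvSpecList, hw]
    · simp only [hw, Bool.false_eq_true, if_false]
      rw [ih]
      cases cur with
      | nil => simp [pvSpecList, hw]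
      | cons h t => simp [pvSpecList, hw]

lemma capB_words (string : String) :
    cap_sentences_alt string
      = PySem.Str.join " " (pvSpecList true (PySem.Str.split₀ string)) := by
  unfold cap_sentences_alt
  have h := capB_fold (PySem.Str.split₀ string) [] []
  simp only [List.flatMap_nil, List.nil_append] at h
  simp only [h]

-- ===== VERDICT (by name: the statement is the Claim_ definition above) =====
theorem cap_sentences_spec : Claim_equal_cap_sentences := by
  intro string _
  unfold Spec_cap_sentences
  rw [capA_words, capB_words]
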